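-- pv_equiv track=rewrite | github.com/pypi-data/pypi-mirror-376 | packages/aesp/aesp-2025.9.12-py3-none-any.whl/aesp/calculator/abacus.py | get_suffix_calculation
-- ===== SOURCE A (Python) =====
-- from typing import Any, Tuple, List, Dict, Optional, Union
-- from typing import (
--     Tuple,
-- )
--
-- def get_suffix_calculation(INPUT: List[str]) -> Tuple[str, str]:
--     suffix = "ABACUS"
--     calculation = "scf"
--     for iline in INPUT:
--         sline = iline.split("#")[0].split()
--         if len(sline) >= 2 and sline[0].lower() == "suffix":
--             suffix = sline[1].strip()
--         elif len(sline) >= 2 and sline[0].lower() == "calculation":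
--             calculation = sline[1].strip()
--     return suffix, calculation
-- ===== SOURCE B (Python) =====
-- def get_suffix_calculation(INPUT):
--     suffix = None
--     calculation = None
--     for iline in reversed(INPUT):
--         sline = iline.split("#")[0].split()
--         if len(sline) >= 2 and sline[0].lower() == "suffix":
--             if suffix is None:
--                 suffix = sline[1].strip()
--         elif len(sline) >= 2 and sline[0].lower() == "calculation":
--             if calculation is None:
--                 calculation = sline[1].strip()
--         if suffix is not None and calculation is not None:
--             break
--     return (suffix if suffix is not None else "ABACUS",
--             calculation if calculation is not None else "scf")
-- ===== Notes on version B (the rewrite author's own statement) =====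
-- stated objective: alternative
-- what changed: B scans the lines in reverse keeping the first 'suffix'/'calculation' hit (= A's last-wins) in Option-style sentinels and breaks as soon as both are captured, instead of A's full forward pass with mutable defaults.
import Mathlib
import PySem

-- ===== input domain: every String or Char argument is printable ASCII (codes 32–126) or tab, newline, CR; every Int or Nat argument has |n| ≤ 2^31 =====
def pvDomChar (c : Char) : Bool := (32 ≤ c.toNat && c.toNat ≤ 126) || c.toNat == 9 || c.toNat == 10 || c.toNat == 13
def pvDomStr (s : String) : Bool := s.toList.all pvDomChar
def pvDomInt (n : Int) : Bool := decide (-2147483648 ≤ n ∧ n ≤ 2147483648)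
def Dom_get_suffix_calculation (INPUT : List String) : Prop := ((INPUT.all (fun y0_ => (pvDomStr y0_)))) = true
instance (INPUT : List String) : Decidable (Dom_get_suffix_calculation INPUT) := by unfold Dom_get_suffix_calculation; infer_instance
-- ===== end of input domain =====

-- B scans the input in reverse with Option sentinels and breaks once both keys are captured; alternative decomposition, same return value.


-- ===== PORT A =====
-- iline.split("#")[0].split()  — split? with sep "#" is always `some` of a nonempty list, so pyGetD _ 0 "" is exact
def pvParse (iline : String) : List String :=
  PySem.Str.split₀ (PySem.List.pyGetD ((PySem.Str.split? iline "#").getD []) 0 "")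

def get_suffix_calculation (INPUT : List String) : String × String :=
  INPUT.foldl
    (fun (acc : String × String) iline =>
      let sline := pvParse iline
      if 2 ≤ sline.length ∧ PySem.Str.lower (PySem.List.pyGetD sline 0 "") = "suffix" then
        (PySem.Str.strip (PySem.List.pyGetD sline 1 ""), acc.2)
      else if 2 ≤ sline.length ∧ PySem.Str.lower (PySem.List.pyGetD sline 0 "") = "calculation" then
        (acc.1, PySem.Str.strip (PySem.List.pyGetD sline 1 ""))
      else acc)
    ("ABACUS", "scf")

-- ===== PORT B =====
def pvScanRev (os oc : Option String) : List String → String × String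
  | [] => (os.getD "ABACUS", oc.getD "scf")
  | iline :: rest =>
    let sline := pvParse iline
    let st :=
      if 2 ≤ sline.length ∧ PySem.Str.lower (PySem.List.pyGetD sline 0 "") = "suffix" then
        (if os = none then some (PySem.Str.strip (PySem.List.pyGetD sline 1 "")) else os, oc)
      else if 2 ≤ sline.length ∧ PySem.Str.lower (PySem.List.pyGetD sline 0 "") = "calculation" then
        (os, if oc = none then some (PySem.Str.strip (PySem.List.pyGetD sline 1 "")) else oc)
      else (os, oc)
    if st.1.isSome ∧ st.2.isSome then (st.1.getD "", st.2.getD "")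
    else pvScanRev st.1 st.2 rest

def get_suffix_calculation_alt (INPUT : List String) : String × String :=
  pvScanRev none none INPUT.reverse

-- ===== PRECONDITION & SPEC =====
def Spec_get_suffix_calculation (INPUT : List String) (out : String × String) : Prop := out = get_suffix_calculation_alt INPUT
instance (INPUT : List String) (out : String × String) : Decidable (Spec_get_suffix_calculation INPUT out) := by unfold Spec_get_suffix_calculation; infer_instance

-- ===== CLAIM (what is proved, stated in full; the proofs are below) =====
def Claim_equal_get_suffix_calculation : Prop := ∀ (INPUT : List String), Dom_get_suffix_calculation INPUT → Spec_get_suffix_calculation INPUT (get_suffix_calculation INPUT)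

-- ===== LEMMAS AND PROOFS =====

-- the reverse scan with sentinels computes the sentinel-overridden value of the forward fold over the reversed list
set_option maxHeartbeats 1000000 in
theorem pvScanRev_eq_foldl (l : List String) : ∀ (os oc : Option String),
    pvScanRev os oc l =
      (os.getD (get_suffix_calculation l.reverse).1, oc.getD (get_suffix_calculation l.reverse).2) := by
  induction l with
  | nil => intro os oc; simp [pvScanRev, get_suffix_calculation]
  | cons x xs ih =>
    intro os oc
    have hrev : (x :: xs).reverse = xs.reverse ++ [x] := by simp
    rw [pvScanRev, hrev]
    unfold get_suffix_calculation
    rw [List.foldl_append]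
    simp only
    set prev := xs.reverse.foldl
      (fun (acc : String × String) iline =>
        let sline := pvParse iline
        if 2 ≤ sline.length ∧ PySem.Str.lower (PySem.List.pyGetD sline 0 "") = "suffix" then
          (PySem.Str.strip (PySem.List.pyGetD sline 1 ""), acc.2)
        else if 2 ≤ sline.length ∧ PySem.Str.lower (PySem.List.pyGetD sline 0 "") = "calculation" then
          (acc.1, PySem.Str.strip (PySem.List.pyGetD sline 1 ""))
        else acc)
      ("ABACUS", "scf") with hprev
    have ihx : ∀ os' oc' : Option String,
        pvScanRev os' oc' xs = (os'.getD prev.1, oc'.getD prev.2) := by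
      intro os' oc'
      rw [ih os' oc']
      unfold get_suffix_calculation
      rw [hprev]
    clear_value prev
    clear hprev ih
    split_ifs with h1 h2 <;>
      cases os <;> cases oc <;>
        simp_all
    all_goals (split_ifs with hc1 hc2 <;>
      first
        | exact absurd hc1.2 (h1 hc1.1)
        | exact absurd hc2.2
            (‹2 ≤ (pvParse x).length → ¬PySem.Str.lower (PySem.List.pyGetD (pvParse x) 0 "") = "calculation"› hc2.1)
        | rfl)

-- ===== VERDICT (by name: the statement is the Claim_ definition above) =====
theorem get_suffix_calculation_spec : Claim_equal_get_suffix_calculation := by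
  intro INPUT _
  unfold Spec_get_suffix_calculation get_suffix_calculation_alt
  rw [pvScanRev_eq_foldl]
  simp
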